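-- pv_equiv track=rewrite | github.com/KuuminKochi/mimi-cli | mimi_diary_cron.py | interleave_messages
-- ===== SOURCE A (Python) =====
-- from typing import List, Dict, Tuple, Optional, Set
--
-- def interleave_messages(
--     user_msgs: List[str], assistant_msgs: List[str]
-- ) -> List[Dict[str, str]]:
--     """
--     Interleave user and assistant messages for context.
--     """
--     conversation = []
--     max_len = min(len(user_msgs), len(assistant_msgs))
--
--     for i in range(max_len):
--         conversation.append({"role": "user", "content": user_msgs[i]})
--         conversation.append({"role": "assistant", "content": assistant_msgs[i]})
--
--     # Add any extra messages
--     if len(user_msgs) > max_len: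
--         for i in range(max_len, len(user_msgs)):
--             conversation.append({"role": "user", "content": user_msgs[i]})
--
--     if len(assistant_msgs) > max_len:
--         for i in range(max_len, len(assistant_msgs)):
--             conversation.append({"role": "assistant", "content": assistant_msgs[i]})
--
--     return conversation
-- ===== SOURCE B (Python) =====
-- def interleave_messages(user_msgs, assistant_msgs):
--     """Interleave user and assistant messages for context.
--
--     Schedule-key sort: user message i gets key 2*i, assistant message i gets
--     key 2*i + 1; sorting the tagged messages by key yields the interleaved
--     prefix followed by the leftover tail of the longer list (all keys are
--     distinct, so the order is fully determined).
--     """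
--     tagged = [(2 * i, {"role": "user", "content": u}) for i, u in enumerate(user_msgs)]
--     tagged += [(2 * i + 1, {"role": "assistant", "content": a}) for i, a in enumerate(assistant_msgs)]
--     tagged.sort(key=lambda t: t[0])
--     return [msg for _, msg in tagged]
-- ===== Notes on version B (the rewrite author's own statement) =====
-- stated objective: alternative
-- what changed: Replaces A's three index loops by a schedule-key sort: each message is tagged with a distinct key (2*i for user i, 2*i+1 for assistant i) and the tagged list is sorted by key, which yields the interleaved prefix then the longer list's tail.
import Mathlib
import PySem

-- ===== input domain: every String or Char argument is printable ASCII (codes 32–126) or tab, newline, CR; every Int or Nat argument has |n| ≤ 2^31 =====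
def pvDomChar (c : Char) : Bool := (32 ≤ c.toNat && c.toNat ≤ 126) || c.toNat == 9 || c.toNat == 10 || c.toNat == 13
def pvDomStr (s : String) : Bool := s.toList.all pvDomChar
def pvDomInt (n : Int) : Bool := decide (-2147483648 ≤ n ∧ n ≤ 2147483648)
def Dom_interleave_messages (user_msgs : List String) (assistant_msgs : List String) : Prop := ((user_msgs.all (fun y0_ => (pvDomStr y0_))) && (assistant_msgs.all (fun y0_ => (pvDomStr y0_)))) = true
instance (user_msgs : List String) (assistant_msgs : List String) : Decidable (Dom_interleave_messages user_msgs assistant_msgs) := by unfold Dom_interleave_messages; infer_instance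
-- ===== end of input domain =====

-- B replaces A's three index loops by a different algorithm: tag each message with a
-- distinct schedule key (2*i for user i, 2*i+1 for assistant i) and sort the tagged
-- list by key; objective: alternative. Equivalence proved on all inputs.

-- ===== PORT A =====
-- dict {"role": r, "content": c} is the association list [("role", r), ("content", c)]
def mkUser (u : String) : List (String × String) := [("role", "user"), ("content", u)]
def mkAssistant (a : String) : List (String × String) := [("role", "assistant"), ("content", a)]

-- indices produced by the loops are always in range, so getD is exact for xs[i]
def interleave_messages (user_msgs : List String) (assistant_msgs : List String) : List (List (String × String)) :=
  let max_len := min user_msgs.length assistant_msgs.length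
  let conversation : List (List (String × String)) :=
    (List.range max_len).foldl
      (fun c i => c ++ [mkUser (user_msgs.getD i "")] ++ [mkAssistant (assistant_msgs.getD i "")]) []
  let conversation :=
    if max_len < user_msgs.length then
      (List.range' max_len (user_msgs.length - max_len)).foldl
        (fun c i => c ++ [mkUser (user_msgs.getD i "")]) conversation
    else conversation
  let conversation :=
    if max_len < assistant_msgs.length then
      (List.range' max_len (assistant_msgs.length - max_len)).foldl
        (fun c i => c ++ [mkAssistant (assistant_msgs.getD i "")]) conversation
    else conversation
  conversation

-- ===== PORT B =====
-- Source B: tag each user message i with key 2*i and each assistant message i with key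
-- 2*i+1 (all keys distinct), sort the tagged list by key, then project the messages.
def interleave_messages_alt (user_msgs : List String) (assistant_msgs : List String) : List (List (String × String)) :=
  let tagged := (PySem.List.enumerate user_msgs).map (fun p => (2 * p.1, mkUser p.2))
  let tagged := tagged ++ (PySem.List.enumerate assistant_msgs).map (fun p => (2 * p.1 + 1, mkAssistant p.2))
  let tagged := PySem.List.sorted tagged (fun t => t.1) false
  tagged.map (fun t => t.2)

-- ===== PRECONDITION & SPEC =====
def Spec_interleave_messages (user_msgs : List String) (assistant_msgs : List String) (out : List (List (String × String))) : Prop := out = interleave_messages_alt user_msgs assistant_msgs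
instance (user_msgs : List String) (assistant_msgs : List String) (out : List (List (String × String))) : Decidable (Spec_interleave_messages user_msgs assistant_msgs out) := by unfold Spec_interleave_messages; infer_instance

-- ===== CLAIM (what is proved, stated in full; the proofs are below) =====
def Claim_equal_interleave_messages : Prop := ∀ (user_msgs : List String) (assistant_msgs : List String), Dom_interleave_messages user_msgs assistant_msgs → Spec_interleave_messages user_msgs assistant_msgs (interleave_messages user_msgs assistant_msgs)

-- ===== LEMMAS AND PROOFS =====

-- per-index item lists of A's three loops
def pairItem (us as : List String) (i : Nat) : List (List (String × String)) :=
  [mkUser (us.getD i "")] ++ [mkAssistant (as.getD i "")]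

def userItem (us : List String) (i : Nat) : List (List (String × String)) :=
  [mkUser (us.getD i "")]

def asstItem (as : List String) (i : Nat) : List (List (String × String)) :=
  [mkAssistant (as.getD i "")]

-- structural form shared by both sides: interleaved zip prefix, then the longer tail
def interleaveG (us as : List String) : List (List (String × String)) :=
  (us.zip as).flatMap (fun p => [mkUser p.1, mkAssistant p.2])
    ++ (us.drop as.length).map mkUser
    ++ (as.drop us.length).map mkAssistant

-- B's sorted order, written out: strictly key-increasing rearrangement of the tagged list
def targetT (us as : List String) : List (Int × List (String × String)) :=
  (PySem.List.enumerate (us.zip as)).flatMap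
      (fun p => [(2 * p.1, mkUser p.2.1), (2 * p.1 + 1, mkAssistant p.2.2)])
    ++ (PySem.List.enumerate (us.drop as.length) as.length).map (fun p => (2 * p.1, mkUser p.2))
    ++ (PySem.List.enumerate (as.drop us.length) us.length).map (fun p => (2 * p.1 + 1, mkAssistant p.2))

lemma flatMap_single {α β : Type} (l : List α) (g : α → β) :
    l.flatMap (fun x => [g x]) = l.map g := by
  induction l <;> simp_all

-- A as a concatenation of three flatMaps over index ranges
lemma A_eq (us as : List String) :
    interleave_messages us as =
      (List.range (min us.length as.length)).flatMap (pairItem us as)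
        ++ (List.range' (min us.length as.length) (us.length - min us.length as.length)).flatMap (userItem us)
        ++ (List.range' (min us.length as.length) (as.length - min us.length as.length)).flatMap (asstItem as) := by
  unfold interleave_messages
  have hp : (fun (c : List (List (String × String))) (i : Nat) =>
      c ++ [mkUser (us.getD i "")] ++ [mkAssistant (as.getD i "")])
      = fun c i => c ++ pairItem us as i := by
    funext c i; simp [pairItem]
  have hu : (fun (c : List (List (String × String))) (i : Nat) =>
      c ++ [mkUser (us.getD i "")]) = fun c i => c ++ userItem us i := by
    funext c i; simp [userItem]
  have ha : (fun (c : List (List (String × String))) (i : Nat) =>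
      c ++ [mkAssistant (as.getD i "")]) = fun c i => c ++ asstItem as i := by
    funext c i; simp [asstItem]
  rw [hp, hu, ha]
  simp only [PySem.List.foldl_append_eq_flatMap]
  split_ifs with c1 c2
  · exfalso; omega
  · rw [show us.length - min us.length as.length = 0 from by omega]
    simp
  · rw [show as.length - min us.length as.length = 0 from by omega]
    simp
  · rw [show us.length - min us.length as.length = 0 from by omega,
        show as.length - min us.length as.length = 0 from by omega]
    simp

-- tail loops: indexed map over range' = map over drop
lemma tail_map (xs : List String) (f : String → List (String × String)) (k : Nat) (hk : k ≤ xs.length) :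
    (List.range' k (xs.length - k)).map (fun i => f (xs.getD i "")) = (xs.drop k).map f := by
  apply List.ext_getElem
  · simp
  · intro j h1 h2
    have hj : j < xs.length - k := by simp at h1; omega
    simp only [List.getElem_map, List.getElem_range', List.getElem_drop, one_mul]
    rw [List.getD_eq_getElem xs "" (by omega)]

-- paired loop indices = zip
lemma range_map_zip (us as : List String) :
    (List.range (min us.length as.length)).map (fun i => (us.getD i "", as.getD i "")) = us.zip as := by
  apply List.ext_getElem
  · simp
  · intro j h1 h2
    simp only [List.getElem_map, List.getElem_range, List.getElem_zip]
    have hj : j < min us.length as.length := by simpa using h1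
    rw [List.getD_eq_getElem us "" (by omega), List.getD_eq_getElem as "" (by omega)]

-- A = interleaveG
lemma A_eq_G (us as : List String) : interleave_messages us as = interleaveG us as := by
  rw [A_eq, interleaveG]
  have h1 : (List.range (min us.length as.length)).flatMap (pairItem us as)
      = (us.zip as).flatMap (fun p => [mkUser p.1, mkAssistant p.2]) := by
    rw [← range_map_zip, List.flatMap_map]
    apply List.flatMap_congr
    intro i _
    simp [pairItem]
  have h2 : (List.range' (min us.length as.length) (us.length - min us.length as.length)).flatMap (userItem us)
      = (us.drop as.length).map mkUser := by
    rcases Nat.le_total us.length as.length with hle | hle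
    · rw [show us.length - min us.length as.length = 0 from by omega,
          List.drop_eq_nil_of_le hle]
      rfl
    · rw [show min us.length as.length = as.length from by omega]
      rw [← tail_map us mkUser as.length hle, ← flatMap_single]
      exact List.flatMap_congr (fun i _ => rfl)
  have h3 : (List.range' (min us.length as.length) (as.length - min us.length as.length)).flatMap (asstItem as)
      = (as.drop us.length).map mkAssistant := by
    rcases Nat.le_total as.length us.length with hle | hle
    · rw [show as.length - min us.length as.length = 0 from by omega,
          List.drop_eq_nil_of_le hle]
      rfl
    · rw [show min us.length as.length = us.length from by omega]
      rw [← tail_map as mkAssistant us.length hle, ← flatMap_single]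
      exact List.flatMap_congr (fun i _ => rfl)
  rw [h1, h2, h3]

-- (enumerate xs s).map (g ∘ snd) = xs.map g
lemma map_snd_enum {α β : Type} (xs : List α) (s : Int) (g : α → β) :
    (PySem.List.enumerate xs s).map (fun p => g p.2) = xs.map g := by
  conv_rhs => rw [← PySem.List.map_snd_enumerate (xs := xs) (s := s)]
  rw [List.map_map]
  rfl

-- projecting the messages out of targetT gives interleaveG
lemma targetT_map_snd (us as : List String) :
    (targetT us as).map (fun t => t.2) = interleaveG us as := by
  unfold targetT interleaveG
  rw [List.map_append, List.map_append]
  congr 1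
  congr 1
  · rw [List.map_flatMap]
    conv_rhs => rw [← PySem.List.map_snd_enumerate (xs := us.zip as) (s := 0)]
    rw [List.flatMap_map]
    apply List.flatMap_congr
    intro p _
    rfl
  · rw [List.map_map]
    exact map_snd_enum (us.drop as.length) (as.length : Int) mkUser
  · rw [List.map_map]
    exact map_snd_enum (as.drop us.length) (us.length : Int) mkAssistant

-- targetT is a rearrangement of the tagged list B sorts
lemma flatMap_two_perm {α β : Type} (l : List α) (f g : α → β) :
    (l.flatMap (fun x => [f x, g x])).Perm (l.map f ++ l.map g) := by
  induction l with
  | nil => simp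
  | cons x xs ih =>
      simp only [List.flatMap_cons, List.map_cons, List.cons_append]
      exact List.Perm.cons _ ((ih.cons _).trans List.perm_middle.symm)

lemma enumZipU (us as : List String) :
    (PySem.List.enumerate (us.zip as)).map (fun p => (2 * p.1, mkUser p.2.1))
      = (PySem.List.enumerate (us.take (min us.length as.length))).map (fun p => (2 * p.1, mkUser p.2)) := by
  apply List.ext_getElem
  · simp [PySem.List.length_enumerate]
  · intro j h1 h2
    simp [PySem.List.getElem_enumerate, List.getElem_zip, List.getElem_take]

lemma enumZipA (us as : List String) :
    (PySem.List.enumerate (us.zip as)).map (fun p => (2 * p.1 + 1, mkAssistant p.2.2))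
      = (PySem.List.enumerate (as.take (min us.length as.length))).map (fun p => (2 * p.1 + 1, mkAssistant p.2)) := by
  apply List.ext_getElem
  · simp [PySem.List.length_enumerate]
  · intro j h1 h2
    simp [PySem.List.getElem_enumerate, List.getElem_zip, List.getElem_take]

-- targetT's tails may be re-based at min: either the start index agrees or both are nil
lemma tailU_eq (us as : List String) :
    (PySem.List.enumerate (us.drop as.length) as.length).map (fun p => (2 * p.1, mkUser p.2))
      = (PySem.List.enumerate (us.drop (min us.length as.length)) ((min us.length as.length : Nat) : Int)).map (fun p => (2 * p.1, mkUser p.2)) := by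
  rcases Nat.le_total us.length as.length with hle | hle
  · rw [List.drop_eq_nil_of_le hle, List.drop_eq_nil_of_le (by omega)]
    simp [PySem.List.enumerate_nil]
  · rw [show min us.length as.length = as.length from by omega]

lemma tailA_eq (us as : List String) :
    (PySem.List.enumerate (as.drop us.length) us.length).map (fun p => (2 * p.1 + 1, mkAssistant p.2))
      = (PySem.List.enumerate (as.drop (min us.length as.length)) ((min us.length as.length : Nat) : Int)).map (fun p => (2 * p.1 + 1, mkAssistant p.2)) := by
  rcases Nat.le_total as.length us.length with hle | hle
  · rw [List.drop_eq_nil_of_le hle, List.drop_eq_nil_of_le (by omega)]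
    simp [PySem.List.enumerate_nil]
  · rw [show min us.length as.length = us.length from by omega]

lemma enumerate_split {α : Type} (xs : List α) (m : Nat) (hm : m ≤ xs.length) :
    PySem.List.enumerate xs = PySem.List.enumerate (xs.take m) ++ PySem.List.enumerate (xs.drop m) m := by
  conv_lhs => rw [← List.take_append_drop m xs]
  rw [PySem.List.enumerate_append]
  congr 2
  simp [hm]

lemma targetT_perm (us as : List String) :
    (targetT us as).Perm
      ((PySem.List.enumerate us).map (fun p => (2 * p.1, mkUser p.2))
        ++ (PySem.List.enumerate as).map (fun p => (2 * p.1 + 1, mkAssistant p.2))) := by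
  unfold targetT
  set m := min us.length as.length with hm
  rw [enumerate_split us m (by omega), enumerate_split as m (by omega),
      List.map_append, List.map_append, tailU_eq, tailA_eq, ← hm]
  set pU := (PySem.List.enumerate (us.take m)).map (fun p => (2 * p.1, mkUser p.2)) with hpU
  set pA := (PySem.List.enumerate (as.take m)).map (fun p => (2 * p.1 + 1, mkAssistant p.2)) with hpA
  set tU := (PySem.List.enumerate (us.drop m) ((m : Nat) : Int)).map (fun p => (2 * p.1, mkUser p.2))
  set tA := (PySem.List.enumerate (as.drop m) ((m : Nat) : Int)).map (fun p => (2 * p.1 + 1, mkAssistant p.2))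
  have hblock : ((PySem.List.enumerate (us.zip as)).flatMap
      (fun p => [(2 * p.1, mkUser p.2.1), (2 * p.1 + 1, mkAssistant p.2.2)])).Perm (pU ++ pA) := by
    have h := flatMap_two_perm (PySem.List.enumerate (us.zip as))
      (fun p => (2 * p.1, mkUser p.2.1)) (fun p => (2 * p.1 + 1, mkAssistant p.2.2))
    rw [enumZipU, enumZipA, ← hm, ← hpU, ← hpA] at h
    exact h
  refine ((hblock.append_right tU).append_right tA).trans ?_
  simp only [List.append_assoc]
  apply List.Perm.append_left
  rw [← List.append_assoc, ← List.append_assoc]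
  exact (List.perm_append_comm).append_right tA

-- targetT is strictly increasing in the key
lemma targetT_pairwise (us as : List String) :
    (targetT us as).Pairwise (fun p q => p.1 < q.1) := by
  unfold targetT
  set m := min us.length as.length with hm
  have hzlen : (us.zip as).length = m := by simp [hm]
  have memBlock : ∀ x ∈ (PySem.List.enumerate (us.zip as)).flatMap
      (fun p => [(2 * p.1, mkUser p.2.1), (2 * p.1 + 1, mkAssistant p.2.2)]),
      0 ≤ x.1 ∧ x.1 < 2 * (m : Int) := by
    intro x hx
    rw [List.mem_flatMap] at hx
    obtain ⟨p, hp, hx⟩ := hx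
    rw [PySem.List.mem_enumerate_iff] at hp
    obtain ⟨k, hk, rfl⟩ := hp
    rw [hzlen] at hk
    simp only [List.mem_cons, List.not_mem_nil, or_false] at hx
    rcases hx with rfl | rfl <;> constructor <;> simp <;> omega
  have memTU : ∀ x ∈ (PySem.List.enumerate (us.drop as.length) as.length).map
      (fun p => (2 * p.1, mkUser p.2)), 2 * (as.length : Int) ≤ x.1 := by
    intro x hx
    rw [List.mem_map] at hx
    obtain ⟨p, hp, rfl⟩ := hx
    rw [PySem.List.mem_enumerate_iff] at hp
    obtain ⟨k, hk, rfl⟩ := hp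
    simp
    try push_cast
    try omega
  have memTA : ∀ x ∈ (PySem.List.enumerate (as.drop us.length) us.length).map
      (fun p => (2 * p.1 + 1, mkAssistant p.2)), 2 * (us.length : Int) + 1 ≤ x.1 := by
    intro x hx
    rw [List.mem_map] at hx
    obtain ⟨p, hp, rfl⟩ := hx
    rw [PySem.List.mem_enumerate_iff] at hp
    obtain ⟨k, hk, rfl⟩ := hp
    simp
    try push_cast
    try omega
  have pwBlock : ((PySem.List.enumerate (us.zip as)).flatMap
      (fun p => [(2 * p.1, mkUser p.2.1), (2 * p.1 + 1, mkAssistant p.2.2)])).Pairwise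
      (fun p q => p.1 < q.1) := by
    rw [List.pairwise_flatMap]
    refine ⟨?_, ?_⟩
    · intro p _
      rw [List.pairwise_pair]
      simp
    · apply List.Pairwise.imp ?_ (PySem.List.pairwise_lt_enumerate _ _)
      intro p q hpq a ha b hb
      simp only [List.mem_cons, List.not_mem_nil, or_false] at ha hb
      rcases ha with rfl | rfl <;> rcases hb with rfl | rfl <;> simp <;> omega
  have pwTU : ((PySem.List.enumerate (us.drop as.length) as.length).map
      (fun p => (2 * p.1, mkUser p.2))).Pairwise (fun p q => p.1 < q.1) := by
    rw [List.pairwise_map]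
    apply List.Pairwise.imp ?_ (PySem.List.pairwise_lt_enumerate _ _)
    intro p q h; simp; omega
  have pwTA : ((PySem.List.enumerate (as.drop us.length) us.length).map
      (fun p => (2 * p.1 + 1, mkAssistant p.2))).Pairwise (fun p q => p.1 < q.1) := by
    rw [List.pairwise_map]
    apply List.Pairwise.imp ?_ (PySem.List.pairwise_lt_enumerate _ _)
    intro p q h; simp; omega
  have hmu : (m : Int) ≤ (us.length : Int) := by push_cast [hm]; omega
  have hma : (m : Int) ≤ (as.length : Int) := by push_cast [hm]; omega
  rw [List.pairwise_append]
  refine ⟨?_, pwTA, ?_⟩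
  · rw [List.pairwise_append]
    refine ⟨pwBlock, pwTU, ?_⟩
    intro a ha b hb
    have hA := memBlock a ha
    have hB := memTU b hb
    omega
  · intro a ha b hb
    have hB := memTA b hb
    rw [List.mem_append] at ha
    rcases ha with ha | ha
    · have hA := memBlock a ha
      omega
    · rcases Nat.le_total us.length as.length with hle | hle
      · rw [List.drop_eq_nil_of_le hle] at ha
        simp [PySem.List.enumerate_nil] at ha
      · rw [List.drop_eq_nil_of_le hle] at hb
        simp [PySem.List.enumerate_nil] at hb

-- B computes targetT's projection
lemma B_eq (us as : List String) :
    interleave_messages_alt us as = (targetT us as).map (fun t => t.2) := by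
  unfold interleave_messages_alt
  show (PySem.List.sorted
      ((PySem.List.enumerate us).map (fun p => (2 * p.1, mkUser p.2))
        ++ (PySem.List.enumerate as).map (fun p => (2 * p.1 + 1, mkAssistant p.2)))
      (fun t => t.1)).map (fun t => t.2) = (targetT us as).map (fun t => t.2)
  rw [PySem.List.sorted_eq_of_perm_of_pairwise_lt _ _ (fun t => t.1)
    (targetT_perm us as) (targetT_pairwise us as)]

-- ===== VERDICT (by name: the statement is the Claim_ definition above) =====
theorem interleave_messages_spec : Claim_equal_interleave_messages := by
  intro us as _
  show interleave_messages us as = interleave_messages_alt us as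
  rw [A_eq_G, B_eq, targetT_map_snd]
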